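-- pv_equiv track=rewrite | github.com/st1vms/Advent-of-Code | AoC_2024/day_10/day10_p1.py | get_trailhead_score
-- ===== SOURCE A (Python) =====
-- DIRECTIONS = {
--     "top": (-1, 0),  # Up
--     "right": (0, 1),  # Right
--     "bottom": (1, 0),  # Down
--     "left": (0, -1),  # Left
-- }
--
-- def is_out_of_bounds(map_matrix: list[list], x: int, y: int) -> bool:
--     """Check if position is out of bounds of matrix"""
--     if 0 <= x < len(map_matrix) and 0 <= y < len(map_matrix[0]):
--         return False
--     return True
--
-- def get_walk_position(x: int, y: int, direction: str) -> tuple[int, int]: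
--     """Get the next position based off starting position and direction"""
--     return (x + DIRECTIONS[direction][0], y + DIRECTIONS[direction][1])
--
-- def find_nearby_cell_pos(
--     topo_map: list[list[int]], start_pos: tuple[int], value: int
-- ) -> list[tuple[int]]:
--     """Finds nearby cell positions in all directions based off value, returns list of coordinates"""
--     pos = []
--
--     x, y = start_pos
--
--     top = get_walk_position(x, y, "top")
--     bottom = get_walk_position(x, y, "bottom")
--     left = get_walk_position(x, y, "left")
--     right = get_walk_position(x, y, "right")
--
--     if (
--         not is_out_of_bounds(topo_map, top[0], top[1])
--         and topo_map[top[0]][top[1]] == value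
--     ):
--         pos.append(top)
--
--     if (
--         not is_out_of_bounds(topo_map, bottom[0], bottom[1])
--         and topo_map[bottom[0]][bottom[1]] == value
--     ):
--         pos.append(bottom)
--
--     if (
--         not is_out_of_bounds(topo_map, left[0], left[1])
--         and topo_map[left[0]][left[1]] == value
--     ):
--         pos.append(left)
--
--     if (
--         not is_out_of_bounds(topo_map, right[0], right[1])
--         and topo_map[right[0]][right[1]] == value
--     ):
--         pos.append(right)
--
--     return pos
--
-- def get_trailhead_score(topo_map: list[list[int]], start_pos: tuple[int]) -> int:
--     """Given a trailhead postion, returns the score"""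
--
--     score = 0
--
--     stack = [start_pos]
--     visited = set()
--
--     while stack:
--         current_pos = stack.pop()
--         x, y = current_pos
--
--         if current_pos in visited:
--             continue
--
--         visited.add(current_pos)
--
--         if topo_map[x][y] == 9:
--             score += 1
--             continue
--
--         next_value = topo_map[x][y] + 1
--         nearby_cells = find_nearby_cell_pos(topo_map, current_pos, next_value)
--
--         for cell in nearby_cells:
--             if cell not in visited:
--                 stack.append(cell)
--
--     return score
-- ===== SOURCE B (Python) =====
-- def get_trailhead_score(topo_map: list[list[int]], start_pos: tuple[int]) -> int:
--     """Given a trailhead position, returns the score (level-by-level BFS up the heights)."""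
--     x, y = start_pos
--     h = topo_map[x][y]
--     if h >= 9:
--         return 1 if h == 9 else 0
--     rows = len(topo_map)
--     cols = len(topo_map[0])
--     frontier = [(x, y)]
--     v = h
--     while v < 9 and frontier:
--         nxt = []
--         for (px, py) in frontier:
--             for q in ((px - 1, py), (px + 1, py), (px, py - 1), (px, py + 1)):
--                 if (0 <= q[0] < rows and 0 <= q[1] < cols
--                         and topo_map[q[0]][q[1]] == v + 1 and q not in nxt):
--                     nxt.append(q)
--         frontier = nxt
--         v += 1
--     return len(frontier)
-- ===== Notes on version B (the rewrite author's own statement) =====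
-- stated objective: alternative
-- what changed: A's explicit-stack DFS with a visited set is replaced by a level-by-level frontier BFS: since every move goes from height h to h+1, B walks the (at most 9-h) height levels once, deduplicating each frontier, and returns the size of the final height-9 frontier, with no stack and no visited set.
-- outside the precondition, e.g. on get_trailhead_score([[1, 1], [5]], (0, 0)): A returns 0, B returns 0
import Mathlib
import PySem

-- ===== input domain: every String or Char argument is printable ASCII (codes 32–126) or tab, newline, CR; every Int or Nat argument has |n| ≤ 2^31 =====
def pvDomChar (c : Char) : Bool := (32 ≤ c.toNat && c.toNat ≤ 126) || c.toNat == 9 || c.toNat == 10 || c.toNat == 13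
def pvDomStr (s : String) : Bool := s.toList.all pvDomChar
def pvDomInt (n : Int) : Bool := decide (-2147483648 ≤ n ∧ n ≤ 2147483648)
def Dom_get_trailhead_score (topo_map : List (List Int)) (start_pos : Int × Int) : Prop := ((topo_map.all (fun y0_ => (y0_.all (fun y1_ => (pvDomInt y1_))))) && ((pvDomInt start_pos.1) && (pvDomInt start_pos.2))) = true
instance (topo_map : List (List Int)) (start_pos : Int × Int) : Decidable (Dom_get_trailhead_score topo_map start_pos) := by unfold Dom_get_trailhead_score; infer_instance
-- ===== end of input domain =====

-- B replaces A's explicit-stack DFS with a visited set by a level-by-level frontier BFS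
-- (heights strictly increase, so no visited set is needed); alternative algorithm, same cost class.

-- ===== PORT A =====

-- len(map_matrix[0]) (0 when the matrix is empty; Python short-circuits before evaluating it then)
def pvCols (m : List (List Int)) : Nat := ((PySem.List.pyGet? m 0).getD []).length

-- topo_map[x][y]; exact (Python wrap/raise semantics) whenever both pyGet? are some — Pre_ ensures
-- this for every access either program performs
def pvVal (m : List (List Int)) (p : Int × Int) : Int :=
  (PySem.List.pyGet? ((PySem.List.pyGet? m p.1).getD []) p.2).getD 0

def DIRECTIONS : PySem.Dict String (Int × Int) :=
  PySem.Dict.ofList [("top", (-1, 0)), ("right", (0, 1)), ("bottom", (1, 0)), ("left", (0, -1))]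

def is_out_of_bounds (m : List (List Int)) (x y : Int) : Bool :=
  if 0 ≤ x ∧ x < (m.length : Int) ∧ 0 ≤ y ∧ y < (pvCols m : Int) then false else true

def get_walk_position (x y : Int) (direction : String) : Int × Int :=
  let d := (PySem.Dict.getD DIRECTIONS direction (0, 0))
  (x + d.1, y + d.2)

def find_nearby_cell_pos (m : List (List Int)) (sp : Int × Int) (value : Int) : List (Int × Int) :=
  let x := sp.1
  let y := sp.2
  let top := get_walk_position x y "top"
  let bottom := get_walk_position x y "bottom"
  let left := get_walk_position x y "left"
  let right := get_walk_position x y "right"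
  let pos : List (Int × Int) := []
  let pos := if !is_out_of_bounds m top.1 top.2 && (pvVal m top == value) then pos ++ [top] else pos
  let pos := if !is_out_of_bounds m bottom.1 bottom.2 && (pvVal m bottom == value) then pos ++ [bottom] else pos
  let pos := if !is_out_of_bounds m left.1 left.2 && (pvVal m left == value) then pos ++ [left] else pos
  if !is_out_of_bounds m right.1 right.2 && (pvVal m right == value) then pos ++ [right] else pos

-- the while loop; the stack is kept head-first (Python appends/pops at the end), fuel only for
-- totality — pvFuelA is enough for every input (proved below)
def pvLoopA (m : List (List Int)) : Nat → List (Int × Int) → PySem.Set (Int × Int) → Int → Int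
  | 0, _, _, score => score
  | _ + 1, [], _, score => score
  | fuel + 1, cur :: rest, visited, score =>
    if PySem.Set.contains visited cur then pvLoopA m fuel rest visited score
    else
      let visited := PySem.Set.add visited cur
      if pvVal m cur == 9 then pvLoopA m fuel rest visited (score + 1)
      else
        let nearby := find_nearby_cell_pos m cur (pvVal m cur + 1)
        pvLoopA m fuel
          (nearby.foldl (fun st c => if PySem.Set.contains visited c then st else c :: st) rest)
          visited score

def pvFuelA (m : List (List Int)) : Nat := 5 * (m.length * pvCols m + 2)

def get_trailhead_score (topo_map : List (List Int)) (start_pos : Int × Int) : Int :=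
  pvLoopA topo_map (pvFuelA topo_map) [start_pos] PySem.Set.empty 0

-- ===== PORT B =====

def pvNbrs (p : Int × Int) : List (Int × Int) :=
  [(p.1 - 1, p.2), (p.1 + 1, p.2), (p.1, p.2 - 1), (p.1, p.2 + 1)]

def pvInB (m : List (List Int)) (q : Int × Int) : Bool :=
  decide (0 ≤ q.1) && decide (q.1 < (m.length : Int)) && decide (0 ≤ q.2) && decide (q.2 < (pvCols m : Int))

-- one level of Source B's while body: all in-bounds neighbours of the frontier of height w, deduplicated
def pvNextLevel (m : List (List Int)) (w : Int) (frontier : List (Int × Int)) : List (Int × Int) :=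
  frontier.foldl (fun nxt p =>
    (pvNbrs p).foldl (fun nxt q =>
      if pvInB m q && (pvVal m q == w) && !nxt.contains q then nxt ++ [q] else nxt) nxt) []

-- Source B's 'while v < 9 and frontier': at most (9-h) iterations, counted down by the fuel
def pvLoopB (m : List (List Int)) : Nat → Int → List (Int × Int) → List (Int × Int)
  | 0, _, fr => fr
  | k + 1, v, fr => if fr.isEmpty then fr else pvLoopB m k (v + 1) (pvNextLevel m (v + 1) fr)

def get_trailhead_score_alt (topo_map : List (List Int)) (start_pos : Int × Int) : Int :=
  let h := pvVal topo_map start_pos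
  if h == 9 then 1
  else if 9 < h then 0
  else ((pvLoopB topo_map (9 - h).toNat h [start_pos]).length : Int)

-- ===== PRECONDITION & SPEC =====
-- Pre_ excludes ragged matrices (a row shorter than row 0), on which a neighbour access can raise
-- IndexError mid-search, and start positions whose initial topo_map[x][y] access raises; on some
-- ragged matrices A happens to return (the short row is never reached) — those are excluded too.
def Pre_get_trailhead_score (topo_map : List (List Int)) (start_pos : Int × Int) : Prop :=
  (∀ r ∈ topo_map, pvCols topo_map ≤ r.length) ∧
  (PySem.List.pyGet? ((PySem.List.pyGet? topo_map start_pos.1).getD []) start_pos.2).isSome = true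

instance (topo_map : List (List Int)) (start_pos : Int × Int) : Decidable (Pre_get_trailhead_score topo_map start_pos) := by
  unfold Pre_get_trailhead_score; infer_instance

def pvWitness_get_trailhead_score : List (List Int) × (Int × Int) := ([[8, 9]], (0, 0))

def Spec_get_trailhead_score (topo_map : List (List Int)) (start_pos : Int × Int) (out : Int) : Prop := out = get_trailhead_score_alt topo_map start_pos
instance (topo_map : List (List Int)) (start_pos : Int × Int) (out : Int) : Decidable (Spec_get_trailhead_score topo_map start_pos out) := by unfold Spec_get_trailhead_score; infer_instance

-- ===== CLAIM (what is proved, stated in full; the proofs are below) =====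
def Claim_equal_get_trailhead_score : Prop := ∀ (topo_map : List (List Int)) (start_pos : Int × Int), Dom_get_trailhead_score topo_map start_pos → Pre_get_trailhead_score topo_map start_pos → Spec_get_trailhead_score topo_map start_pos (get_trailhead_score topo_map start_pos)

-- ===== LEMMAS AND PROOFS =====

-- one legal move: from a non-9 cell to an adjacent in-bounds cell exactly one higher
def pvStep (m : List (List Int)) (p q : Int × Int) : Prop :=
  pvVal m p ≠ 9 ∧ q ∈ pvNbrs p ∧ pvInB m q = true ∧ pvVal m q = pvVal m p + 1

def pvReach (m : List (List Int)) (s p : Int × Int) : Prop :=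
  Relation.ReflTransGen (pvStep m) s p

def pvAllCells (m : List (List Int)) : List (Int × Int) :=
  (List.range m.length).flatMap (fun i => (List.range (pvCols m)).map (fun j => (Int.ofNat i, Int.ofNat j)))

lemma gw_top (x y : Int) : get_walk_position x y "top" = (x - 1, y) := by
  have h : get_walk_position x y "top" = (x + -1, y + 0) := rfl
  rw [h, Prod.mk.injEq]; omega

lemma gw_bottom (x y : Int) : get_walk_position x y "bottom" = (x + 1, y) := by
  have h : get_walk_position x y "bottom" = (x + 1, y + 0) := rfl
  rw [h, Prod.mk.injEq]; omega

lemma gw_left (x y : Int) : get_walk_position x y "left" = (x, y - 1) := by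
  have h : get_walk_position x y "left" = (x + 0, y + -1) := rfl
  rw [h, Prod.mk.injEq]; omega

lemma gw_right (x y : Int) : get_walk_position x y "right" = (x, y + 1) := by
  have h : get_walk_position x y "right" = (x + 0, y + 1) := rfl
  rw [h, Prod.mk.injEq]; omega

lemma mem_allCells_of_inB {m : List (List Int)} {q : Int × Int} (h : pvInB m q = true) :
    q ∈ pvAllCells m := by
  obtain ⟨a, b⟩ := q
  simp only [pvInB, Bool.and_eq_true, decide_eq_true_eq] at h
  obtain ⟨⟨⟨h1, h2⟩, h3⟩, h4⟩ := h
  have hi : a.toNat < m.length := by omega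
  have hj : b.toNat < pvCols m := by omega
  unfold pvAllCells
  refine List.mem_flatMap.mpr ⟨a.toNat, List.mem_range.mpr hi, ?_⟩
  refine List.mem_map.mpr ⟨b.toNat, List.mem_range.mpr hj, ?_⟩
  rw [Prod.mk.injEq]
  simp only [Int.ofNat_eq_natCast]
  omega

lemma length_allCells (m : List (List Int)) : (pvAllCells m).length = m.length * pvCols m := by
  simp [pvAllCells, List.length_flatMap]

lemma not_out_iff {m : List (List Int)} (x y : Int) :
    (!is_out_of_bounds m x y) = pvInB m (x, y) := by
  have hd : pvInB m (x, y) =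
      decide (0 ≤ x ∧ x < (m.length : Int) ∧ 0 ≤ y ∧ y < (pvCols m : Int)) := by
    simp only [pvInB, Bool.decide_and]
    ac_rfl
  rw [hd]
  simp only [is_out_of_bounds]
  split_ifs with h <;> simp [h]

lemma mem_ite_append {c : Bool} {l : List (Int × Int)} {x a : Int × Int} :
    (a ∈ if c then l ++ [x] else l) ↔ a ∈ l ∨ (a = x ∧ c = true) := by
  cases c <;> simp

lemma mem_find_nearby {m : List (List Int)} {p q : Int × Int} {w : Int} :
    q ∈ find_nearby_cell_pos m p w ↔ q ∈ pvNbrs p ∧ pvInB m q = true ∧ pvVal m q = w := by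
  obtain ⟨x, y⟩ := p
  simp only [find_nearby_cell_pos, gw_top, gw_bottom, gw_left, gw_right, not_out_iff]
  rw [mem_ite_append, mem_ite_append, mem_ite_append, mem_ite_append]
  simp only [List.not_mem_nil, false_or, Bool.and_eq_true, beq_iff_eq, pvNbrs, List.mem_cons,
    List.not_mem_nil, or_false]
  constructor
  · rintro ((((⟨rfl, hb, hv⟩ | ⟨rfl, hb, hv⟩) | ⟨rfl, hb, hv⟩) | ⟨rfl, hb, hv⟩)) <;>
      exact ⟨by simp, hb, hv⟩
  · rintro ⟨(rfl | rfl | rfl | rfl), hb, hv⟩ <;> tauto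


lemma length_find_nearby_le {m : List (List Int)} {p : Int × Int} {w : Int} :
    (find_nearby_cell_pos m p w).length ≤ 4 := by
  simp only [find_nearby_cell_pos]
  split_ifs <;> simp

lemma reach_le {m : List (List Int)} {s p : Int × Int} (h : pvReach m s p) :
    pvVal m s ≤ pvVal m p := by
  induction h with
  | refl => omega
  | tail _ h2 ih => have := h2.2.2.2; omega

lemma reach_level_eq_self {m : List (List Int)} {s p : Int × Int} (h : pvReach m s p)
    (hv : pvVal m p = pvVal m s) : p = s := by
  rcases (Relation.ReflTransGen.cases_tail h) with h0 | ⟨c, hc, hstep⟩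
  · exact h0
  · have h1 := reach_le hc
    have h2 := hstep.2.2.2
    omega

lemma reach_exists_level {m : List (List Int)} {s : Int × Int} :
    ∀ q, pvReach m s q → ∀ w : Int, pvVal m s ≤ w → w ≤ pvVal m q →
      ∃ p, pvReach m s p ∧ pvVal m p = w := by
  intro q hq
  induction hq with
  | refl => intro w h1 h2; exact ⟨s, Relation.ReflTransGen.refl, by omega⟩
  | @tail b c h1 h2 ih =>
    intro w hw1 hw2
    by_cases hwc : w = pvVal m c
    · exact ⟨c, h1.tail h2, hwc.symm⟩
    · have := h2.2.2.2
      exact ih w hw1 (by omega)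

lemma reach_closed_mem {m : List (List Int)} {s : Int × Int} {V : List (Int × Int)}
    (hs : s ∈ V) (hcl : ∀ p ∈ V, ∀ q, pvStep m p q → q ∈ V) :
    ∀ p, pvReach m s p → p ∈ V := by
  intro p hp
  induction hp with
  | refl => exact hs
  | tail h1 h2 ih => exact hcl _ ih _ h2

-- ---- A's loop computes |{reachable cells of height 9}| ----

lemma pvCardBound (m : List (List Int)) (s : Int × Int) {V : List (Int × Int)}
    (hnd : V.Nodup) (hb : ∀ p ∈ V, p = s ∨ pvInB m p = true) :
    V.length ≤ m.length * pvCols m + 1 := by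
  have hsub : V ⊆ s :: pvAllCells m := by
    intro p hp
    rcases hb p hp with rfl | h
    · exact List.mem_cons_self
    · exact List.mem_cons_of_mem _ (mem_allCells_of_inB h)
  have h := (List.subperm_of_subset hnd hsub).length_le
  simp only [List.length_cons, length_allCells] at h
  omega

lemma mem_foldl_push (vis : PySem.Set (Int × Int)) :
    ∀ (l st : List (Int × Int)) (a : Int × Int),
      a ∈ l.foldl (fun st c => if PySem.Set.contains vis c then st else c :: st) st ↔
        a ∈ st ∨ (a ∈ l ∧ a ∉ vis) := by
  intro l
  induction l with
  | nil => simp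
  | cons c t ih =>
    intro st a
    simp only [List.foldl_cons]
    rw [ih]
    by_cases hcv : PySem.Set.contains vis c = true
    · have hcm : c ∈ vis := (PySem.Set.contains_iff _ _).mp hcv
      simp only [hcv, if_true, List.mem_cons]
      constructor
      · rintro (h | h)
        · exact Or.inl h
        · exact Or.inr ⟨Or.inr h.1, h.2⟩
      · rintro (h | ⟨(rfl | h2), hnv⟩)
        · exact Or.inl h
        · exact absurd hcm hnv
        · exact Or.inr ⟨h2, hnv⟩
    · have hcm : c ∉ vis := fun hm => hcv ((PySem.Set.contains_iff _ _).mpr hm)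
      simp only [hcv, if_false, Bool.false_eq_true, List.mem_cons]
      constructor
      · rintro ((rfl | h) | h)
        · exact Or.inr ⟨Or.inl rfl, hcm⟩
        · exact Or.inl h
        · exact Or.inr ⟨Or.inr h.1, h.2⟩
      · rintro (h | ⟨(rfl | h2), hnv⟩)
        · exact Or.inl (Or.inr h)
        · exact Or.inl (Or.inl rfl)
        · exact Or.inr ⟨h2, hnv⟩

lemma length_foldl_push (vis : PySem.Set (Int × Int)) :
    ∀ (l st : List (Int × Int)),
      (l.foldl (fun st c => if PySem.Set.contains vis c then st else c :: st) st).length ≤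
        st.length + l.length := by
  intro l
  induction l with
  | nil => simp
  | cons c t ih =>
    intro st
    simp only [List.foldl_cons]
    split_ifs with h
    · have := ih st
      simp only [List.length_cons]
      omega
    · have := ih (c :: st)
      simp only [List.length_cons] at *
      omega

lemma loopA_spec (m : List (List Int)) (s : Int × Int) :
    ∀ (fuel : Nat) (stack : List (Int × Int)) (visited : PySem.Set (Int × Int)) (score : Int),
    visited.Nodup →
    (∀ p ∈ visited, pvReach m s p) →
    (∀ p ∈ stack, pvReach m s p) →
    (∀ p ∈ visited, ∀ q, pvStep m p q → q ∈ visited ∨ q ∈ stack) →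
    (s ∈ visited ∨ s ∈ stack) →
    (∀ p ∈ visited, p = s ∨ pvInB m p = true) →
    (∀ p ∈ stack, p = s ∨ pvInB m p = true) →
    score = ((visited.filter (fun p => pvVal m p == 9)).length : Int) →
    stack.length + 5 * (m.length * pvCols m + 1 - visited.length) + 1 ≤ fuel →
    ∃ V : List (Int × Int), V.Nodup ∧ (∀ p, p ∈ V ↔ pvReach m s p) ∧
      pvLoopA m fuel stack visited score = ((V.filter (fun p => pvVal m p == 9)).length : Int) := by
  intro fuel
  induction fuel with
  | zero =>
    intro stack visited score _ _ _ _ _ _ _ _ hfuel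
    exact absurd hfuel (by omega)
  | succ fuel ih =>
    intro stack visited score hnd hvr hsr hcl hs hvb hsb hscore hfuel
    match stack with
    | [] =>
      refine ⟨visited, hnd, ?_, hscore⟩
      intro p
      constructor
      · exact hvr p
      · refine reach_closed_mem ?_ ?_ p
        · rcases hs with h | h
          · exact h
          · simp at h
        · intro a ha q hq
          rcases hcl a ha q hq with h | h
          · exact h
          · simp at h
    | cur :: rest =>
      by_cases hc : PySem.Set.contains visited cur = true
      · have hstep : pvLoopA m (fuel + 1) (cur :: rest) visited score =
            pvLoopA m fuel rest visited score := by
          simp only [pvLoopA, hc, if_true]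
        rw [hstep]
        refine ih rest visited score hnd hvr (fun p hp => hsr p (List.mem_cons_of_mem _ hp))
          ?_ ?_ hvb (fun p hp => hsb p (List.mem_cons_of_mem _ hp)) hscore (by simp at hfuel; omega)
        · intro p hp q hq
          rcases hcl p hp q hq with h | h
          · exact Or.inl h
          · rcases List.mem_cons.mp h with rfl | h
            · exact Or.inl ((PySem.Set.contains_iff _ _).mp hc)
            · exact Or.inr h
        · rcases hs with h | h
          · exact Or.inl h
          · rcases List.mem_cons.mp h with rfl | h
            · exact Or.inl ((PySem.Set.contains_iff _ _).mp hc)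
            · exact Or.inr h
      · have hcmem : cur ∉ visited := fun hmem => hc ((PySem.Set.contains_iff _ _).mpr hmem)
        have hcurR : pvReach m s cur := hsr cur List.mem_cons_self
        have hadd : PySem.Set.add visited cur = visited ++ [cur] := by
          simp only [PySem.Set.add]
          rw [if_neg hc]
        have hnd' : (PySem.Set.add visited cur).Nodup := PySem.Set.nodup_add _ _ hnd
        have hmem' : ∀ p, p ∈ PySem.Set.add visited cur ↔ p ∈ visited ∨ p = cur := fun p =>
          PySem.Set.mem_add _ _ _
        have hlen' : (PySem.Set.add visited cur).length = visited.length + 1 := by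
          rw [hadd]; simp
        have hvb' : ∀ p ∈ PySem.Set.add visited cur, p = s ∨ pvInB m p = true := by
          intro p hp
          rcases (hmem' p).mp hp with h | rfl
          · exact hvb p h
          · exact hsb p List.mem_cons_self
        have hbound : (PySem.Set.add visited cur).length ≤ m.length * pvCols m + 1 := by
          refine pvCardBound m s hnd' hvb'
        have hvr' : ∀ p ∈ PySem.Set.add visited cur, pvReach m s p := by
          intro p hp
          rcases (hmem' p).mp hp with h | rfl
          · exact hvr p h
          · exact hcurR
        by_cases h9 : pvVal m cur = 9
        · have hstep : pvLoopA m (fuel + 1) (cur :: rest) visited score =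
              pvLoopA m fuel rest (PySem.Set.add visited cur) (score + 1) := by
            simp only [pvLoopA, hc, if_false, Bool.false_eq_true, h9]
            simp
          rw [hstep]
          refine ih rest (PySem.Set.add visited cur) (score + 1) hnd' hvr'
            (fun p hp => hsr p (List.mem_cons_of_mem _ hp)) ?_ ?_ hvb'
            (fun p hp => hsb p (List.mem_cons_of_mem _ hp)) ?_ (by simp at hfuel; omega)
          · intro p hp q hq
            rcases (hmem' p).mp hp with h | rfl
            · rcases hcl p h q hq with h2 | h2
              · exact Or.inl ((hmem' q).mpr (Or.inl h2))
              · rcases List.mem_cons.mp h2 with rfl | h3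
                · exact Or.inl ((hmem' q).mpr (Or.inr rfl))
                · exact Or.inr h3
            · exact absurd h9 hq.1
          · rcases hs with h | h
            · exact Or.inl ((hmem' s).mpr (Or.inl h))
            · rcases List.mem_cons.mp h with rfl | h
              · exact Or.inl ((hmem' s).mpr (Or.inr rfl))
              · exact Or.inr h
          · rw [hadd, List.filter_append]
            simp only [List.filter_cons, List.filter_nil, h9]
            simp only [hscore]
            simp
        · have hstep : pvLoopA m (fuel + 1) (cur :: rest) visited score =
              pvLoopA m fuel
                ((find_nearby_cell_pos m cur (pvVal m cur + 1)).foldl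
                  (fun st c => if PySem.Set.contains (PySem.Set.add visited cur) c then st
                    else c :: st) rest)
                (PySem.Set.add visited cur) score := by
            simp only [pvLoopA, hc, if_false, Bool.false_eq_true]
            simp [h9]
          rw [hstep]
          set nearby := find_nearby_cell_pos m cur (pvVal m cur + 1) with hnb
          set S' := nearby.foldl
            (fun st c => if PySem.Set.contains (PySem.Set.add visited cur) c then st
              else c :: st) rest with hS'
          have hS'mem : ∀ a, a ∈ S' ↔ a ∈ rest ∨
              (a ∈ nearby ∧ a ∉ PySem.Set.add visited cur) :=
            fun a => mem_foldl_push (PySem.Set.add visited cur) nearby rest a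
          have hS'len : S'.length ≤ rest.length + nearby.length :=
            length_foldl_push (PySem.Set.add visited cur) nearby rest
          have hnblen : nearby.length ≤ 4 := length_find_nearby_le
          refine ih S' (PySem.Set.add visited cur) score hnd' hvr' ?_ ?_ ?_ hvb' ?_ ?_ ?_
          · intro p hp
            rcases (hS'mem p).mp hp with h | ⟨h, _⟩
            · exact hsr p (List.mem_cons_of_mem _ h)
            · have hm := mem_find_nearby.mp h
              exact hcurR.tail ⟨h9, hm.1, hm.2.1, hm.2.2⟩
          · intro p hp q hq
            rcases (hmem' p).mp hp with h | hpc
            · rcases hcl p h q hq with h2 | h2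
              · exact Or.inl ((hmem' q).mpr (Or.inl h2))
              · rcases List.mem_cons.mp h2 with rfl | h3
                · exact Or.inl ((hmem' q).mpr (Or.inr rfl))
                · exact Or.inr ((hS'mem q).mpr (Or.inl h3))
            · rw [hpc] at hq
              have hqnb : q ∈ nearby := by
                rw [hnb, mem_find_nearby]
                exact ⟨hq.2.1, hq.2.2.1, hq.2.2.2⟩
              by_cases hqv : q ∈ PySem.Set.add visited cur
              · exact Or.inl hqv
              · exact Or.inr ((hS'mem q).mpr (Or.inr ⟨hqnb, hqv⟩))
          · rcases hs with h | h
            · exact Or.inl ((hmem' s).mpr (Or.inl h))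
            · rcases List.mem_cons.mp h with rfl | h
              · exact Or.inl ((hmem' s).mpr (Or.inr rfl))
              · exact Or.inr ((hS'mem s).mpr (Or.inl h))
          · intro p hp
            rcases (hS'mem p).mp hp with h | ⟨h, _⟩
            · exact hsb p (List.mem_cons_of_mem _ h)
            · exact Or.inr (mem_find_nearby.mp h).2.1
          · rw [hadd, List.filter_append]
            simp only [List.filter_cons, List.filter_nil]
            simp only [hscore]
            simp [h9]
          · simp only [List.length_cons] at hfuel
            omega

-- ---- B's loop computes {reachable cells of height 9} ----

lemma mem_foldl_addIf (P : Int × Int → Bool) :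
    ∀ (l acc : List (Int × Int)) (a : Int × Int),
      a ∈ l.foldl (fun nxt q => if P q && !nxt.contains q then nxt ++ [q] else nxt) acc ↔
        a ∈ acc ∨ (a ∈ l ∧ P a = true) := by
  intro l
  induction l with
  | nil => simp
  | cons q t ih =>
    intro acc a
    simp only [List.foldl_cons]
    rw [ih]
    have hstep : ∀ b, b ∈ (if P q && !acc.contains q then acc ++ [q] else acc) ↔
        b ∈ acc ∨ (b = q ∧ P q = true) := by
      intro b
      split_ifs with hc
      · simp only [Bool.and_eq_true, Bool.not_eq_eq_eq_not, Bool.not_true] at hc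
        simp [hc.1]
      · simp only [Bool.and_eq_true, Bool.not_eq_eq_eq_not, Bool.not_true,
          not_and] at hc
        constructor
        · exact Or.inl
        · rintro (h | ⟨rfl, hP⟩)
          · exact h
          · have := hc hP
            exact List.mem_of_elem_eq_true (by simpa using this)
    rw [hstep a]
    simp only [List.mem_cons]
    constructor
    · rintro ((h | ⟨rfl, hP⟩) | ⟨ht, hP⟩)
      · exact Or.inl h
      · exact Or.inr ⟨Or.inl rfl, hP⟩
      · exact Or.inr ⟨Or.inr ht, hP⟩
    · rintro (h | ⟨(rfl | ht), hP⟩)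
      · exact Or.inl (Or.inl h)
      · exact Or.inl (Or.inr ⟨rfl, hP⟩)
      · exact Or.inr ⟨ht, hP⟩

lemma nodup_foldl_addIf (P : Int × Int → Bool) :
    ∀ (l acc : List (Int × Int)), acc.Nodup →
      (l.foldl (fun nxt q => if P q && !nxt.contains q then nxt ++ [q] else nxt) acc).Nodup := by
  intro l
  induction l with
  | nil => intro acc h; simpa using h
  | cons q t ih =>
    intro acc h
    simp only [List.foldl_cons]
    refine ih _ ?_
    split_ifs with hc
    · simp only [Bool.and_eq_true, Bool.not_eq_eq_eq_not, Bool.not_true] at hc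
      have hq : q ∉ acc := by
        have := hc.2
        simpa using this
      simpa [List.concat_eq_append] using h.concat hq
    · exact h

lemma nextLevel_aux (m : List (List Int)) (w : Int) :
    ∀ (fr acc : List (Int × Int)) (a : Int × Int),
      a ∈ fr.foldl (fun nxt p =>
          (pvNbrs p).foldl (fun nxt q =>
            if pvInB m q && (pvVal m q == w) && !nxt.contains q then nxt ++ [q] else nxt) nxt)
        acc ↔
      a ∈ acc ∨ ∃ p ∈ fr, a ∈ pvNbrs p ∧ pvInB m a = true ∧ pvVal m a = w := by
  intro fr
  induction fr with
  | nil => simp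
  | cons p t ih =>
    intro acc a
    simp only [List.foldl_cons]
    rw [ih]
    rw [mem_foldl_addIf (fun q => pvInB m q && (pvVal m q == w))]
    simp only [Bool.and_eq_true, beq_iff_eq, List.mem_cons]
    constructor
    · rintro ((h | ⟨hnb, hin, hval⟩) | ⟨pp, hpp, hr⟩)
      · exact Or.inl h
      · exact Or.inr ⟨p, Or.inl rfl, hnb, hin, hval⟩
      · exact Or.inr ⟨pp, Or.inr hpp, hr⟩
    · rintro (h | ⟨pp, (rfl | hpp), hr⟩)
      · exact Or.inl (Or.inl h)
      · exact Or.inl (Or.inr ⟨hr.1, hr.2.1, hr.2.2⟩)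
      · exact Or.inr ⟨pp, hpp, hr⟩

lemma mem_nextLevel {m : List (List Int)} {w : Int} {fr : List (Int × Int)} {a : Int × Int} :
    a ∈ pvNextLevel m w fr ↔ ∃ p ∈ fr, a ∈ pvNbrs p ∧ pvInB m a = true ∧ pvVal m a = w := by
  rw [pvNextLevel, nextLevel_aux]
  simp

lemma nodup_nextLevel {m : List (List Int)} {w : Int} {fr : List (Int × Int)} :
    (pvNextLevel m w fr).Nodup := by
  have aux : ∀ (fr acc : List (Int × Int)), acc.Nodup →
      (fr.foldl (fun nxt p =>
          (pvNbrs p).foldl (fun nxt q =>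
            if pvInB m q && (pvVal m q == w) && !nxt.contains q then nxt ++ [q] else nxt) nxt)
        acc).Nodup := by
    intro fr
    induction fr with
    | nil => intro acc h; simpa using h
    | cons p t ih =>
      intro acc h
      simp only [List.foldl_cons]
      exact ih _ (nodup_foldl_addIf (fun q => pvInB m q && (pvVal m q == w)) _ _ h)
  exact aux fr [] List.nodup_nil

lemma loopB_spec (m : List (List Int)) (s : Int × Int) :
    ∀ (k : Nat) (v : Int) (F : List (Int × Int)),
    pvVal m s ≤ v → v + (k : Int) = 9 →
    F.Nodup → (∀ p, p ∈ F ↔ pvReach m s p ∧ pvVal m p = v) →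
    (pvLoopB m k v F).Nodup ∧
      (∀ p, p ∈ pvLoopB m k v F ↔ pvReach m s p ∧ pvVal m p = 9) := by
  intro k
  induction k with
  | zero =>
    intro v F hle hsum hnd hmem
    have hv : v = 9 := by push_cast at hsum; omega
    subst hv
    exact ⟨hnd, hmem⟩
  | succ k ih =>
    intro v F hle hsum hnd hmem
    have hv8 : v ≤ 8 := by push_cast at hsum; omega
    simp only [pvLoopB]
    by_cases hF : F.isEmpty
    · rw [if_pos hF]
      have hFnil : F = [] := List.isEmpty_iff.mp hF
      subst hFnil
      refine ⟨List.nodup_nil, ?_⟩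
      intro p
      simp only [List.not_mem_nil, false_iff, not_and]
      intro hr h9
      obtain ⟨pp, hpp, hlev⟩ := reach_exists_level p hr v hle (by omega)
      have : pp ∈ ([] : List (Int × Int)) := (hmem pp).mpr ⟨hpp, hlev⟩
      simp at this
    · rw [if_neg hF]
      refine ih (v + 1) (pvNextLevel m (v + 1) F) (by omega) (by push_cast at hsum ⊢; omega)
        nodup_nextLevel ?_
      intro p
      rw [mem_nextLevel]
      constructor
      · rintro ⟨pp, hpF, hnb, hin, hval⟩
        obtain ⟨hr, hlev⟩ := (hmem pp).mp hpF
        exact ⟨hr.tail ⟨by omega, hnb, hin, by omega⟩, hval⟩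
      · rintro ⟨hr, hval⟩
        rcases Relation.ReflTransGen.cases_tail hr with rfl | ⟨c, hc, hstep⟩
        · omega
        · have hc4 := hstep.2.2.2
          have hcF : c ∈ F := (hmem c).mpr ⟨hc, by omega⟩
          exact ⟨c, hcF, hstep.2.1, hstep.2.2.1, hval⟩

-- ---- the two counts agree ----

lemma reach_of_start9 {m : List (List Int)} {s p : Int × Int} (h9 : pvVal m s = 9)
    (hr : pvReach m s p) : p = s := by
  rcases Relation.ReflTransGen.cases_head hr with h | ⟨c, hstep, _⟩
  · exact h.symm
  · exact absurd h9 hstep.1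

lemma main_eq (m : List (List Int)) (sp : Int × Int) :
    get_trailhead_score m sp = get_trailhead_score_alt m sp := by
  obtain ⟨V, hVnd, hVmem, hA⟩ :=
    loopA_spec m sp (pvFuelA m) [sp] PySem.Set.empty 0
      List.nodup_nil
      (by intro p hp; simp [PySem.Set.empty] at hp)
      (by intro p hp; simp at hp; subst hp; exact Relation.ReflTransGen.refl)
      (by intro p hp; simp [PySem.Set.empty] at hp)
      (Or.inr List.mem_cons_self)
      (by intro p hp; simp [PySem.Set.empty] at hp)
      (by intro p hp; simp at hp; subst hp; exact Or.inl rfl)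
      (by simp [PySem.Set.empty])
      (by show 1 + 5 * (m.length * pvCols m + 1 - 0) + 1 ≤ 5 * (m.length * pvCols m + 2)
          omega)
  have hAeq : get_trailhead_score m sp = ((V.filter (fun p => pvVal m p == 9)).length : Int) := hA
  have hspV : sp ∈ V := (hVmem sp).mpr Relation.ReflTransGen.refl
  by_cases h9 : pvVal m sp = 9
  · have halt : get_trailhead_score_alt m sp = 1 := by
      simp [get_trailhead_score_alt, h9]
    rw [halt, hAeq]
    have hperm : List.Perm (V.filter (fun p => pvVal m p == 9)) [sp] := by
      refine (List.perm_ext_iff_of_nodup (hVnd.filter _) (List.nodup_singleton sp)).mpr ?_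
      intro a
      simp only [List.mem_filter, List.mem_singleton, beq_iff_eq]
      constructor
      · rintro ⟨hmem, _⟩
        exact reach_of_start9 h9 ((hVmem a).mp hmem)
      · rintro rfl
        exact ⟨hspV, by simp [h9]⟩
    rw [hperm.length_eq]
    simp
  · by_cases hgt : 9 < pvVal m sp
    · have halt : get_trailhead_score_alt m sp = 0 := by
        simp only [get_trailhead_score_alt]
        rw [if_neg (by simpa using h9), if_pos (by simpa using hgt)]
      rw [halt, hAeq]
      have hnil : V.filter (fun p => pvVal m p == 9) = [] := by
        rw [List.filter_eq_nil_iff]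
        intro a ha
        have := reach_le ((hVmem a).mp ha)
        simp only [beq_iff_eq]
        omega
      rw [hnil]
      simp
    · have hlt : pvVal m sp < 9 := by omega
      have halt : get_trailhead_score_alt m sp =
          ((pvLoopB m (9 - pvVal m sp).toNat (pvVal m sp) [sp]).length : Int) := by
        simp only [get_trailhead_score_alt]
        rw [if_neg (by simpa using h9), if_neg (by simpa using hgt)]
      have hmemF : ∀ p, p ∈ [sp] ↔ pvReach m sp p ∧ pvVal m p = pvVal m sp := by
        intro p
        simp only [List.mem_singleton]
        constructor
        · rintro rfl
          exact ⟨Relation.ReflTransGen.refl, rfl⟩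
        · rintro ⟨hr, hval⟩
          exact reach_level_eq_self hr hval
      obtain ⟨hGnd, hGmem⟩ :=
        loopB_spec m sp (9 - pvVal m sp).toNat (pvVal m sp) [sp] le_rfl (by omega)
          (List.nodup_singleton sp) hmemF
      rw [halt, hAeq]
      have hperm : List.Perm (V.filter (fun p => pvVal m p == 9))
          (pvLoopB m (9 - pvVal m sp).toNat (pvVal m sp) [sp]) := by
        refine (List.perm_ext_iff_of_nodup (hVnd.filter _) hGnd).mpr ?_
        intro a
        rw [hGmem a]
        simp only [List.mem_filter, beq_iff_eq]
        constructor
        · rintro ⟨hmem, hval⟩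
          exact ⟨(hVmem a).mp hmem, hval⟩
        · rintro ⟨hr, hval⟩
          exact ⟨(hVmem a).mpr hr, hval⟩
      rw [hperm.length_eq]

-- ===== VERDICT (by name: the statement is the Claim_ definition above) =====
theorem get_trailhead_score_spec : Claim_equal_get_trailhead_score := by
  intro m sp _ _
  unfold Spec_get_trailhead_score
  exact main_eq m sp
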